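-- pv_equiv track=rewrite | github.com/QTTQ/coding-interview-python | src/problems/p29_n_smallest_numbers.py | n_smallest_numbers1
-- ===== SOURCE A (Python) =====
-- def n_smallest_numbers1(n, seq=None):
--     """
--     另外一种思路（特别适合海量数据的情况）：
--     考虑 n 远小于数组长度（如海量数据）的情况，此时假设不能一次加载
--     所有数据，那么可以维护一个大小为 n 的容器
--
--     当容器未满时，每次将新元素加入到容器中；当容器满了后，我们需要将
--     容器中最大值找出来：
--     1. 如果最大值小于当前的值，则无需操作
--     2. 如果最大值大于当前的值，则替换
--
--     所以我们要做的是在该容器上实现较高效率的操作（查找最大数、插入、删除）：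
--     1. 使用大根堆，这样可以实现每次以 O(1) 时间获取最大值，O(log n) 时间
--        插入值
--     2. 使用 max，查找时间可能为 O(n)
--
--     整体最佳复杂度可以到 O(n * log k)
--     """
--     if n == 0:
--         return None
--
--     if seq is None:
--         return None
--
--     if n > len(seq):
--         return None
--
--     # 该容器存放最小的 k 个数
--     numbers = []
--
--     # 同样，我们使用 heapq 模块，利用堆快速获取最大值
--     from heapq import heappush, heapreplace
--     for x in seq:
--         if len(numbers) >= n:
--             # 获取最大值
--             largest_num = -numbers[0]
--
--             # 最大的那个值肯定不会 n 个小值之一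
--             if x < largest_num:
--                 heapreplace(numbers, -x)
--         else:
--             # 注意，默认建立小根堆，所以取反后间接建立大根堆
--             heappush(numbers, -x)
--
--     return {-x for x in numbers}
-- ===== SOURCE B (Python) =====
-- def n_smallest_numbers1(n, seq=None):
--     if n == 0:
--         return None
--
--     if seq is None:
--         return None
--
--     if n > len(seq):
--         return None
--
--     # sort once and take the n-element prefix: those are the n smallest
--     return set(sorted(seq)[:n])
-- ===== Notes on version B (the rewrite author's own statement) =====
-- stated objective: simpler
-- what changed: The streaming size-n max-heap maintenance loop is replaced by a single full sort of the sequence followed by taking the n-element prefix as a set; the three guard clauses are kept unchanged.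
import Mathlib
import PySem

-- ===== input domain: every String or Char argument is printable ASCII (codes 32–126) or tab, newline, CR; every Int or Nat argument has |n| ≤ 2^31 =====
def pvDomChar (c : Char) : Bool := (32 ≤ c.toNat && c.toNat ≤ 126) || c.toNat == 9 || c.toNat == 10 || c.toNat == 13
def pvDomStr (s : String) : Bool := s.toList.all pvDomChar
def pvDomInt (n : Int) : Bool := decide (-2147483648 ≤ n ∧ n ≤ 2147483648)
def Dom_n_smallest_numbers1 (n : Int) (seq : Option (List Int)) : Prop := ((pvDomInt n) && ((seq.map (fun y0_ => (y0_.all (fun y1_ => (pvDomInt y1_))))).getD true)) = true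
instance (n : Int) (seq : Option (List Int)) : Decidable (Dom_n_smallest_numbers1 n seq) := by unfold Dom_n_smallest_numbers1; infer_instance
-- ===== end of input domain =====

-- B replaces A's streaming size-n max-heap loop by one full sort plus an n-element
-- prefix (objective: simpler); the returned Python set is emitted in ascending order
-- (Python's set iteration order is unspecified; sets are compared as finite sets).

-- ===== PORT A =====
-- CPython's heapq is a C-implemented binary min-heap; we model the heap container as
-- an ascending sorted list: heap[0] (the only element A ever reads) and the element
-- multiset agree exactly with heapq's, which determines A's observable behaviour.
def pvHeapPush (h : List Int) (v : Int) : List Int :=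
  PySem.List.insertBy (fun a b => decide (a < b)) v h

def pvHeapReplace (h : List Int) (v : Int) : List Int :=
  pvHeapPush h.tail v   -- drop the root heap[0], insert v

def n_smallest_numbers1 (n : Int) (seq : Option (List Int)) : Option (List Int) :=
  if n = 0 then none
  else match seq with
  | none => none
  | some s =>
    if n > (s.length : Int) then none
    else
      let numbers : List Int :=
        s.foldl (fun numbers x =>
          if (numbers.length : Int) ≥ n then
            -- numbers[0]: Pre_ excludes the inputs where Python raises IndexError here
            let largest_num := -(PySem.List.pyGetD numbers 0 0)
            if x < largest_num then pvHeapReplace numbers (-x) else numbers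
          else pvHeapPush numbers (-x)) []
      -- {-x for x in numbers}, emitted in ascending order
      some (PySem.Set.ofList (PySem.List.sorted (numbers.map (fun y => -y)) (fun y => y) false))

-- ===== PORT B =====
def n_smallest_numbers1_alt (n : Int) (seq : Option (List Int)) : Option (List Int) :=
  if n = 0 then none
  else match seq with
  | none => none
  | some s =>
    if n > (s.length : Int) then none
    else some (PySem.Set.ofList (PySem.List.slice (PySem.List.sorted s (fun y => y) false) none (some n)))

-- ===== PRECONDITION & SPEC =====
-- Pre_ excludes only the inputs where A raises IndexError: a negative n together with
-- a non-empty sequence (the heap is still empty when numbers[0] is read).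
def Pre_n_smallest_numbers1 (n : Int) (seq : Option (List Int)) : Prop :=
  0 ≤ n ∨ seq = none ∨ seq = some []
instance (n : Int) (seq : Option (List Int)) : Decidable (Pre_n_smallest_numbers1 n seq) := by
  unfold Pre_n_smallest_numbers1; infer_instance

def pvWitness_n_smallest_numbers1 : Int × Option (List Int) := (2, some [5, 1, 4, 1, 3])

def Spec_n_smallest_numbers1 (n : Int) (seq : Option (List Int)) (out : Option (List Int)) : Prop := out = n_smallest_numbers1_alt n seq
instance (n : Int) (seq : Option (List Int)) (out : Option (List Int)) : Decidable (Spec_n_smallest_numbers1 n seq out) := by unfold Spec_n_smallest_numbers1; infer_instance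

-- ===== CLAIM (what is proved, stated in full; the proofs are below) =====
def Claim_equal_n_smallest_numbers1 : Prop := ∀ (n : Int) (seq : Option (List Int)), Dom_n_smallest_numbers1 n seq → Pre_n_smallest_numbers1 n seq → Spec_n_smallest_numbers1 n seq (n_smallest_numbers1 n seq)

-- ===== LEMMAS AND PROOFS =====

-- ψ K: the ascending list of the negations of the ascending list K (the heap model)
def pvPsi (K : List Int) : List Int := (K.map (fun y => -y)).reverse

theorem pvPsi_perm (K : List Int) : (pvPsi K).Perm (K.map (fun y => -y)) := by
  simp [pvPsi]

theorem pvPsi_concat (A : List Int) (m : Int) : pvPsi (A ++ [m]) = -m :: pvPsi A := by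
  simp [pvPsi]

theorem pvPsi_pairwise {K : List Int} (h : K.Pairwise (· ≤ ·)) :
    (pvPsi K).Pairwise (· ≤ ·) := by
  unfold pvPsi
  rw [List.pairwise_reverse, List.pairwise_map]
  exact h.imp (by omega)

theorem pvInt_eq_of_perm_of_pairwise {a b : List Int}
    (hp : a.Perm b) (ha : a.Pairwise (· ≤ ·)) (hb : b.Pairwise (· ≤ ·)) : a = b :=
  List.Perm.eq_of_pairwise (fun _ _ _ _ h1 h2 => le_antisymm h1 h2) ha hb hp

theorem pvSorted_pairwise (xs : List Int) :
    (PySem.List.sorted xs (fun y => y) false).Pairwise (· ≤ ·) :=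
  PySem.List.sorted_pairwise xs (fun y => y)

-- insertion into an already ascending list is sorting the appended list
theorem pvInsertBy_eq_sorted {S : List Int} (h : S.Pairwise (· ≤ ·)) (x : Int) :
    PySem.List.insertBy (fun a b => decide (a < b)) x S
      = PySem.List.sorted (S ++ [x]) (fun y => y) false := by
  rw [PySem.List.sorted_eq_foldl_insertBy, List.foldl_append,
      ← PySem.List.sorted_eq_foldl_insertBy,
      PySem.List.sorted_eq_self_of_pairwise _ _ h]
  simp

theorem pvInsertBy_cons (x y : Int) (ys : List Int) :
    PySem.List.insertBy (fun a b => decide (a < b)) x (y :: ys)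
      = if x < y then x :: y :: ys
        else y :: PySem.List.insertBy (fun a b => decide (a < b)) x ys := by
  simp [PySem.List.insertBy]

-- the core selection lemma: how the (k+1)-element prefix of a sorted list reacts to
-- inserting one more element
theorem pvTake_insertBy (x : Int) :
    ∀ (S : List Int) (k : Nat), S.Pairwise (· ≤ ·) → ∀ (hl : k < S.length),
      (x < S[k] → (List.take (k+1) (PySem.List.insertBy (fun a b => decide (a < b)) x S)).Perm
          (x :: List.take k S)) ∧
      (S[k] ≤ x → List.take (k+1) (PySem.List.insertBy (fun a b => decide (a < b)) x S)
          = List.take (k+1) S) := by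
  intro S
  induction S with
  | nil => intro k _ hl; simp at hl
  | cons y ys ih =>
    intro k hp hl
    rw [pvInsertBy_cons]
    by_cases hxy : x < y
    · simp only [if_pos hxy]
      constructor
      · intro _; simp [List.take_succ_cons]
      · intro hle
        exfalso
        have : y ≤ (y :: ys)[k] := by
          cases k with
          | zero => simp
          | succ k' =>
            have := (List.pairwise_cons.mp hp).1
            simp only [List.getElem_cons_succ]
            exact this _ (List.getElem_mem _)
        omega
    · simp only [if_neg hxy]
      have hyx : y ≤ x := by omega
      cases k with
      | zero =>
        constructor
        · intro hlt; simp at hlt; omega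
        · intro _; simp
      | succ k' =>
        have hl' : k' < ys.length := by simpa using hl
        have hp' : ys.Pairwise (· ≤ ·) := (List.pairwise_cons.mp hp).2
        have IH := ih k' hp' hl'
        constructor
        · intro hlt
          simp only [List.getElem_cons_succ] at hlt
          have h1 := IH.1 hlt
          simp only [List.take_succ_cons]
          exact (h1.cons y).trans (List.Perm.swap x y _)
        · intro hle
          simp only [List.getElem_cons_succ] at hle
          have h2 := IH.2 hle
          simp only [List.take_succ_cons, h2]

-- A's loop step, abstracted
def pvStep (n : Int) (numbers : List Int) (x : Int) : List Int :=
  if (numbers.length : Int) ≥ n then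
    let largest_num := -(PySem.List.pyGetD numbers 0 0)
    if x < largest_num then pvHeapReplace numbers (-x) else numbers
  else pvHeapPush numbers (-x)

-- the n smallest elements of p, as the sorted prefix
def pvSel (nn : Nat) (p : List Int) : List Int :=
  List.take nn (PySem.List.sorted p (fun y => y) false)

theorem pvSel_pairwise (nn : Nat) (p : List Int) : (pvSel nn p).Pairwise (· ≤ ·) :=
  (pvSorted_pairwise p).sublist (List.take_sublist _ _)

theorem pvSel_perm_small (nn : Nat) {p : List Int} (h : p.length ≤ nn) :
    (pvSel nn p).Perm p := by
  unfold pvSel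
  rw [List.take_of_length_le (by rw [PySem.List.length_sorted]; exact h)]
  exact PySem.List.sorted_perm p _ _

theorem pvSel_length (nn : Nat) (p : List Int) :
    (pvSel nn p).length = min nn p.length := by
  simp [pvSel, PySem.List.length_sorted]

theorem pvSorted_append_singleton (p : List Int) (x : Int) :
    PySem.List.sorted (p ++ [x]) (fun y => y) false
      = PySem.List.insertBy (fun a b => decide (a < b)) x
          (PySem.List.sorted p (fun y => y) false) := by
  rw [PySem.List.sorted_eq_foldl_insertBy, List.foldl_append,
      ← PySem.List.sorted_eq_foldl_insertBy]
  simp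

-- the invariant step: one loop iteration of A updates the heap model from
-- ψ(selection of p) to ψ(selection of p ++ [x])
theorem pvStep_invariant {n : Int} (hn : 1 ≤ n) (p : List Int) (x : Int) :
    pvStep n (pvPsi (pvSel n.toNat p)) x = pvPsi (pvSel n.toNat (p ++ [x])) := by
  set nn := n.toNat with hnn
  have hnn1 : 1 ≤ nn := by omega
  set S := PySem.List.sorted p (fun y => y) false with hS
  have hSp : S.Pairwise (· ≤ ·) := pvSorted_pairwise p
  have hSlen : S.length = p.length := PySem.List.length_sorted p _ _
  have hKp : (pvSel nn p).Pairwise (· ≤ ·) := pvSel_pairwise nn p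
  have hψp : (pvPsi (pvSel nn p)).Pairwise (· ≤ ·) := pvPsi_pairwise hKp
  have hlen : (pvPsi (pvSel nn p)).length = min nn p.length := by
    simp [pvPsi, pvSel_length]
  have hS' : PySem.List.sorted (p ++ [x]) (fun y => y) false
      = PySem.List.insertBy (fun a b => decide (a < b)) x S := pvSorted_append_singleton p x
  by_cases hsmall : p.length < nn
  · -- container not yet full: heappush
    have hbr : ¬ ((pvPsi (pvSel nn p)).length : Int) ≥ n := by
      rw [hlen]; omega
    rw [pvStep, if_neg hbr]
    unfold pvHeapPush
    rw [pvInsertBy_eq_sorted hψp]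
    refine pvInt_eq_of_perm_of_pairwise ?_ (pvSorted_pairwise _) (pvPsi_pairwise (pvSel_pairwise _ _))
    have h2 : (pvPsi (pvSel nn p)).Perm ((pvSel nn p).map (fun y => -y)) := pvPsi_perm _
    have h3 : (pvSel nn p).Perm p := pvSel_perm_small nn (by omega)
    have h4 : (pvSel nn (p ++ [x])).Perm (p ++ [x]) :=
      pvSel_perm_small nn (by simp; omega)
    have e1 : (pvPsi (pvSel nn p) ++ [-x]).Perm ((p ++ [x]).map (fun y => -y)) := by
      rw [List.map_append]
      simpa using (h2.trans (h3.map _)).append_right [-x]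
    have e2 : ((p ++ [x]).map (fun y => -y)).Perm (pvPsi (pvSel nn (p ++ [x]))) :=
      ((h4.map _).symm).trans (pvPsi_perm _).symm
    exact (PySem.List.sorted_perm _ _ _).trans (e1.trans e2)
  · -- container full
    have hplen : nn ≤ p.length := by omega
    have hK : pvSel nn p = List.take nn S := rfl
    have hKlen : (pvSel nn p).length = nn := by rw [pvSel_length]; omega
    have hbr : ((pvPsi (pvSel nn p)).length : Int) ≥ n := by rw [hlen]; omega
    have hknn : nn - 1 < S.length := by omega
    -- the heap root is -S[nn-1], the negation of the largest kept element
    have h1 : nn - 1 + 1 = nn := by omega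
    have hKlast : pvSel nn p = List.take (nn-1) S ++ [S[nn-1]] := by
      rw [hK]
      conv_lhs => rw [← h1]
      rw [List.take_add_one, List.getElem?_eq_getElem hknn]
      rfl
    have hroot : PySem.List.pyGetD (pvPsi (pvSel nn p)) 0 0 = -S[nn-1] := by
      rw [PySem.List.pyGetD_zero, hKlast, pvPsi_concat]
      rfl
    rw [pvStep, if_pos hbr]
    simp only [hroot, neg_neg]
    have hsel' : pvSel nn (p ++ [x])
        = List.take nn (PySem.List.insertBy (fun a b => decide (a < b)) x S) := by
      rw [pvSel, hS']
    have htake := pvTake_insertBy x S (nn-1) hSp hknn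
    by_cases hx : x < S[nn-1]
    · rw [if_pos hx]
      -- heapreplace: drop the root, insert -x
      have htail : (pvPsi (pvSel nn p)).tail = pvPsi (List.take (nn-1) S) := by
        rw [hKlast, pvPsi_concat]
        rfl
      have htailp : ((pvPsi (pvSel nn p)).tail).Pairwise (· ≤ ·) := by
        rw [htail]
        exact pvPsi_pairwise ((hSp).sublist (List.take_sublist _ _))
      unfold pvHeapReplace pvHeapPush
      rw [pvInsertBy_eq_sorted htailp]
      refine pvInt_eq_of_perm_of_pairwise ?_ (pvSorted_pairwise _) (pvPsi_pairwise (pvSel_pairwise _ _))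
      have h2 : (pvSel nn (p ++ [x])).Perm (x :: List.take (nn-1) S) := by
        rw [hsel', show nn = (nn-1)+1 by omega]
        exact htake.1 hx
      have e1 : ((pvPsi (pvSel nn p)).tail ++ [-x]).Perm ((x :: List.take (nn-1) S).map (fun y => -y)) := by
        rw [htail, List.map_cons]
        exact ((pvPsi_perm _).append_right [-x]).trans
          (List.perm_append_comm (l₁ := (List.take (nn-1) S).map (fun y => -y)) (l₂ := [-x]))
      have e2 : ((x :: List.take (nn-1) S).map (fun y => -y)).Perm (pvPsi (pvSel nn (p ++ [x]))) :=
        ((h2.map _).symm).trans (pvPsi_perm _).symm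
      exact (PySem.List.sorted_perm _ _ _).trans (e1.trans e2)
    · rw [if_neg hx]
      have hle : S[nn-1] ≤ x := by omega
      have hsame : pvSel nn (p ++ [x]) = pvSel nn p := by
        rw [hsel', hK, show nn = (nn-1)+1 by omega]
        exact htake.2 hle
      rw [hsame]

theorem pvFold_invariant {n : Int} (hn : 1 ≤ n) :
    ∀ (s p : List Int),
      s.foldl (pvStep n) (pvPsi (pvSel n.toNat p)) = pvPsi (pvSel n.toNat (p ++ s)) := by
  intro s
  induction s with
  | nil => intro p; simp
  | cons x xs ih =>
    intro p
    rw [List.foldl_cons, pvStep_invariant hn p x, ih (p ++ [x])]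
    simp

theorem pvFold_closed {n : Int} (hn : 1 ≤ n) (s : List Int) :
    s.foldl (pvStep n) [] = pvPsi (pvSel n.toNat s) := by
  have h := pvFold_invariant hn s []
  have hnil : pvPsi (pvSel n.toNat []) = [] := by simp [pvPsi, pvSel, PySem.List.sorted]
  rw [hnil, List.nil_append] at h
  exact h

-- unsorting ψ: sorting the negations of the heap model recovers the selection
theorem pvPsi_unsort (K : List Int) (hK : K.Pairwise (· ≤ ·)) :
    PySem.List.sorted ((pvPsi K).map (fun y => -y)) (fun y => y) false = K := by
  have hperm : ((pvPsi K).map (fun y => -y)).Perm K := by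
    calc ((pvPsi K).map (fun y => -y)).Perm ((K.map (fun y => -y)).map (fun y => -y)) :=
          (pvPsi_perm K).map _
      _ = K := by simp
  apply pvInt_eq_of_perm_of_pairwise
  · exact (PySem.List.sorted_perm _ _ _).trans hperm
  · exact pvSorted_pairwise _
  · exact hK

-- ===== VERDICT (by name: the statement is the Claim_ definition above) =====
theorem n_smallest_numbers1_spec : Claim_equal_n_smallest_numbers1 := by
  intro n seq _ hpre
  unfold Spec_n_smallest_numbers1 n_smallest_numbers1 n_smallest_numbers1_alt
  by_cases h0 : n = 0
  · simp [h0]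
  · simp only [if_neg h0]
    match seq with
    | none => rfl
    | some s =>
      by_cases hlen : n > (s.length : Int)
      · simp [hlen]
      · simp only [if_neg hlen]
        have hn1 : 1 ≤ n ∨ s = [] := by
          rcases hpre with h | h | h
          · left; omega
          · simp at h
          · right
            simp only [Option.some.injEq] at h
            exact h
        rcases hn1 with hn1 | rfl
        · have hfold : s.foldl (fun numbers x =>
              if (numbers.length : Int) ≥ n then
                let largest_num := -(PySem.List.pyGetD numbers 0 0)
                if x < largest_num then pvHeapReplace numbers (-x) else numbers
              else pvHeapPush numbers (-x)) [] = pvPsi (pvSel n.toNat s) :=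
            pvFold_closed hn1 s
          rw [hfold, pvPsi_unsort _ (pvSel_pairwise _ _)]
          rw [PySem.List.slice_to _ (by omega : (0:Int) ≤ n)]
          rfl
        · -- s = [] (reachable inside Pre_ only with n < 0; the loop does nothing)
          have : n < 0 := by simp at hlen; omega
          simp [PySem.List.sorted, PySem.List.slice, PySem.Set.ofList]
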